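-- pv_equiv track=rewrite | github.com/AbdulxSikandar/AbdulxSikandar | Interview Programs.py | nth_occurence_element
-- ===== SOURCE A (Python) =====
-- def nth_occurence_element(alist,element,n):
--     count = 0
--     for i in range(0,len(alist)):
--            if (alist[i] == element):
--                count = count+1
--                if (count == n):
--                    del (alist[i])
--                    return True
--     return False
-- ===== SOURCE B (Python) =====
-- def nth_occurence_element(alist, element, n):
--     positions = [i for i, x in enumerate(alist) if x == element]
--     if 1 <= n <= len(positions):
--         del alist[positions[n - 1]]
--         return True
--     return False
-- ===== Notes on version B (the rewrite author's own statement) =====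
-- stated objective: simpler
-- what changed: B builds the full table of occurrence positions once and decides success by a single bounds check 1 <= n <= len(positions), deleting via the indexed table, instead of A's inline counter with early return during the scan.
import Mathlib
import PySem

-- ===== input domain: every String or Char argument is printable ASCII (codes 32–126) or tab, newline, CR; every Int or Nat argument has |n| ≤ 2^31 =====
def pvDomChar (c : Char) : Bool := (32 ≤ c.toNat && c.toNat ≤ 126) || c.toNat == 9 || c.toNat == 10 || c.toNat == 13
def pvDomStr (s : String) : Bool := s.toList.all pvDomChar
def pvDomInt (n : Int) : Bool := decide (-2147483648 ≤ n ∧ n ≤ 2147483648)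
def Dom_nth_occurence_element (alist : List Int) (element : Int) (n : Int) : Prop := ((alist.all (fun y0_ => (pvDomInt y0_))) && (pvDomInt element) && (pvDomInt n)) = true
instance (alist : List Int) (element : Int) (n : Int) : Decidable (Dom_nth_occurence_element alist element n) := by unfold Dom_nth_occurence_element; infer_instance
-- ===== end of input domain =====

-- B is a position-table reformulation (simpler decomposition); both A and B mutate alist in
-- Python by deleting one element — this file proves equality of the RETURN value only.
-- ===== PORT A =====
-- the index loop with the running counter, as structural recursion over the remaining list
def nth_go (rest : List Int) (element : Int) (n : Int) (count : Int) : Bool :=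
  match rest with
  | [] => false
  | x :: xs =>
    if x = element then
      if count + 1 = n then true else nth_go xs element n (count + 1)
    else nth_go xs element n count

def nth_occurence_element (alist : List Int) (element : Int) (n : Int) : Bool :=
  nth_go alist element n 0

-- ===== PORT B =====
def nth_occurence_element_alt (alist : List Int) (element : Int) (n : Int) : Bool :=
  let positions :=
    ((PySem.List.enumerate alist).filter (fun p => p.2 == element)).map Prod.fst
  decide (1 ≤ n ∧ n ≤ (positions.length : Int))

-- ===== PRECONDITION & SPEC =====
def Spec_nth_occurence_element (alist : List Int) (element : Int) (n : Int) (out : Bool) : Prop := out = nth_occurence_element_alt alist element n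
instance (alist : List Int) (element : Int) (n : Int) (out : Bool) : Decidable (Spec_nth_occurence_element alist element n out) := by unfold Spec_nth_occurence_element; infer_instance

-- ===== CLAIM (what is proved, stated in full; the proofs are below) =====
def Claim_equal_nth_occurence_element : Prop := ∀ (alist : List Int) (element : Int) (n : Int), Dom_nth_occurence_element alist element n → Spec_nth_occurence_element alist element n (nth_occurence_element alist element n)

-- ===== LEMMAS AND PROOFS =====

-- A's loop with counter c returns true iff the target n lies in (c, c + #remaining matches]
lemma nth_go_eq (xs : List Int) (element n c : Int) :
    nth_go xs element n c
      = decide (c < n ∧ n ≤ c + ((xs.filter (fun x => x == element)).length : Int)) := by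
  induction xs generalizing c with
  | nil => simp [nth_go]
  | cons x xs ih =>
    rw [nth_go]
    by_cases hx : x = element
    · rw [if_pos hx]
      have hf : ((x :: xs).filter (fun x => x == element)).length
          = (xs.filter (fun x => x == element)).length + 1 := by
        simp [hx]
      by_cases hn : c + 1 = n
      · rw [if_pos hn]
        symm; rw [decide_eq_true_iff, hf]; push_cast; omega
      · rw [if_neg hn, ih, hf]
        rw [decide_eq_decide]; push_cast; omega
    · rw [if_neg hx, ih]
      have hb : (x == element) = false := by simpa using hx
      simp [hb]

-- the position table has one entry per match
lemma positions_length (xs : List Int) (element : Int) (s : Int) :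
    (((PySem.List.enumerate xs s).filter (fun p => p.2 == element)).map Prod.fst).length
      = (xs.filter (fun x => x == element)).length := by
  induction xs generalizing s with
  | nil => simp [PySem.List.enumerate_nil]
  | cons x xs ih =>
    rw [PySem.List.enumerate_cons]
    by_cases hx : (x == element) = true
    · simp [hx, ih]
    · have hb : (x == element) = false := by simpa using hx
      simp [hb, ih]

-- ===== VERDICT (by name: the statement is the Claim_ definition above) =====
theorem nth_occurence_element_spec : Claim_equal_nth_occurence_element := by
  intro alist element n _
  unfold Spec_nth_occurence_element nth_occurence_element nth_occurence_element_alt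
  rw [nth_go_eq]
  show _ = decide (1 ≤ n ∧ n ≤ ((((PySem.List.enumerate alist 0).filter
      (fun p => p.2 == element)).map Prod.fst).length : Int))
  rw [positions_length, decide_eq_decide]; omega
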